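-- pv_equiv track=rewrite | github.com/deeppavlov/DeepPavlov | deeppavlov/models/kbqa/query_generator_online.py | make_entity_combs
-- ===== SOURCE A (Python) =====
-- from typing import Tuple, List, Any
--
-- def make_entity_combs(entity_ids: List[List[str]]) -> List[Tuple[str, str, int]]:
--     ent_combs = []
--     for n, entity_1 in enumerate(entity_ids[0]):
--         for m, entity_2 in enumerate(entity_ids[1]):
--             ent_combs.append((entity_1, entity_2, (n + m)))
--             ent_combs.append((entity_2, entity_1, (n + m)))
--
--     ent_combs = sorted(ent_combs, key=lambda x: x[2])
--     return ent_combs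
-- ===== SOURCE B (Python) =====
-- # Bucket construction by key k = n + m: emit combinations directly in final order, no sort.
-- def make_entity_combs(entity_ids):
--     first = entity_ids[0]
--     if not first:
--         return []
--     second = entity_ids[1]
--     n_len, m_len = len(first), len(second)
--     ent_combs = []
--     for k in range(n_len + m_len - 1):
--         for n in range(max(0, k - m_len + 1), min(n_len, k + 1)):
--             e1, e2 = first[n], second[k - n]
--             ent_combs.append((e1, e2, k))
--             ent_combs.append((e2, e1, k))
--     return ent_combs
-- ===== Notes on version B (the rewrite author's own statement) =====
-- stated objective: faster
-- what changed: B drops the sort entirely: it emits the pair combinations bucket-by-bucket in increasing key k = n + m (n increasing within a bucket), which is provably the stable-sorted order A produces.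
import Mathlib
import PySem

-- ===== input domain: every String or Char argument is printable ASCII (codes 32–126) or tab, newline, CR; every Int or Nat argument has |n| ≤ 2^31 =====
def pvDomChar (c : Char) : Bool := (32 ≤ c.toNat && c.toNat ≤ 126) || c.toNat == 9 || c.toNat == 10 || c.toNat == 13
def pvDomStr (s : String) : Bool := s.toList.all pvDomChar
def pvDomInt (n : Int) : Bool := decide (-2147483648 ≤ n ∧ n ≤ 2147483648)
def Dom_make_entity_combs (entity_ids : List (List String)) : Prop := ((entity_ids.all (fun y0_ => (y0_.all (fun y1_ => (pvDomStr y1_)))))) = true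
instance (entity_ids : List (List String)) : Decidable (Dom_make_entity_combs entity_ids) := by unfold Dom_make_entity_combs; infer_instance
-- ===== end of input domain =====

-- B replaces 'generate all pairs then stable-sort by n+m' by emitting the pairs bucket-by-bucket
-- (k = n+m increasing, n increasing inside a bucket), which is exactly the stable-sorted order; no sort.

-- ===== PORT A =====
def make_entity_combs (entity_ids : List (List String)) : List (String × String × Int) :=
  let first := (PySem.List.pyGet? entity_ids 0).getD []
  let ent_combs :=
    (PySem.List.enumerate first).foldl (fun acc p =>
      (PySem.List.enumerate ((PySem.List.pyGet? entity_ids 1).getD [])).foldl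
        (fun acc2 q => acc2 ++ [(p.2, q.2, p.1 + q.1)] ++ [(q.2, p.2, p.1 + q.1)]) acc) []
  PySem.List.sorted ent_combs (fun x => x.2.2) false

-- ===== PORT B =====
def make_entity_combs_alt (entity_ids : List (List String)) : List (String × String × Int) :=
  match PySem.List.pyGet? entity_ids 0 with
  | none => []
  | some first =>
    if first = [] then []
    else
      match PySem.List.pyGet? entity_ids 1 with
      | none => []
      | some second =>
        let nLen : Int := first.length
        let mLen : Int := second.length
        (PySem.List.pyRange 0 (nLen + mLen - 1)).foldl (fun acc k =>
          (PySem.List.pyRange (max 0 (k - mLen + 1)) (min nLen (k + 1))).foldl (fun acc2 n =>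
            let e1 := PySem.List.pyGetD first n ""
            let e2 := PySem.List.pyGetD second (k - n) ""
            acc2 ++ [(e1, e2, k), (e2, e1, k)]) acc) []

-- ===== PRECONDITION & SPEC =====
-- Pre_ excludes exactly the inputs on which Python A raises IndexError:
-- the empty outer list, and an outer list of length 1 whose only inner list is nonempty
-- (then the loop body evaluates entity_ids[1]).
def Pre_make_entity_combs (entity_ids : List (List String)) : Prop :=
  entity_ids ≠ [] ∧ (entity_ids.headD [] = [] ∨ 2 ≤ entity_ids.length)
instance (entity_ids : List (List String)) : Decidable (Pre_make_entity_combs entity_ids) := by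
  unfold Pre_make_entity_combs; infer_instance
def pvWitness_make_entity_combs : List (List String) := [["a"], ["b"]]

def Spec_make_entity_combs (entity_ids : List (List String)) (out : List (String × String × Int)) : Prop := out = make_entity_combs_alt entity_ids
instance (entity_ids : List (List String)) (out : List (String × String × Int)) : Decidable (Spec_make_entity_combs entity_ids out) := by unfold Spec_make_entity_combs; infer_instance

-- ===== CLAIM (what is proved, stated in full; the proofs are below) =====
def Claim_equal_make_entity_combs : Prop := ∀ (entity_ids : List (List String)), Dom_make_entity_combs entity_ids → Pre_make_entity_combs entity_ids → Spec_make_entity_combs entity_ids (make_entity_combs entity_ids)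

-- ===== LEMMAS AND PROOFS =====

theorem pv_insertBy_append_not {α : Type} (before : α → α → Bool) (x : α) (A B : List α)
    (h : ∀ y ∈ A, before x y = false) :
    PySem.List.insertBy before x (A ++ B) = A ++ PySem.List.insertBy before x B := by
  induction A with
  | nil => simp
  | cons a A ih =>
    have ha : before x a = false := h a (by simp)
    simp only [List.cons_append, PySem.List.insertBy, ha]
    simp only [Bool.false_eq_true, if_false]
    rw [ih (fun y hy => h y (by simp [hy]))]

theorem pv_insertBy_all_before {α : Type} (before : α → α → Bool) (x : α) (B : List α)
    (h : ∀ y ∈ B, before x y = true) :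
    PySem.List.insertBy before x B = x :: B := by
  cases B with
  | nil => rfl
  | cons b B => simp [PySem.List.insertBy, h b (by simp)]

theorem pv_insert_buckets {α : Type} (key : α → Int) (x : α) (ks : List Int) (F : Int → List α)
    (hks : ks.Pairwise (· < ·)) (hx : key x ∈ ks)
    (hF : ∀ k ∈ ks, ∀ y ∈ F k, key y = k) :
    PySem.List.insertBy (fun a b => decide (key a < key b)) x (ks.flatMap F)
      = ks.flatMap (fun k => F k ++ if key x = k then [x] else []) := by
  induction ks with
  | nil => simp at hx
  | cons k ks ih =>
    have hlt : ∀ k' ∈ ks, k < k' := (List.pairwise_cons.mp hks).1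
    have hks' : ks.Pairwise (· < ·) := (List.pairwise_cons.mp hks).2
    by_cases hkx : key x = k
    · have h1 : ∀ y ∈ F k, (fun a b => decide (key a < key b)) x y = false := by
        intro y hy
        have := hF k (by simp) y hy
        simp [this, hkx]
      have h2 : ∀ y ∈ ks.flatMap F, (fun a b => decide (key a < key b)) x y = true := by
        intro y hy
        obtain ⟨k', hk', hy'⟩ := List.mem_flatMap.mp hy
        have := hF k' (by simp [hk']) y hy'
        simp [this, hkx]
        exact hlt k' hk'
      rw [List.flatMap_cons, pv_insertBy_append_not _ _ _ _ h1, pv_insertBy_all_before _ _ _ h2]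
      rw [List.flatMap_cons, if_pos hkx]
      have : ks.flatMap (fun k' => F k' ++ if key x = k' then [x] else []) = ks.flatMap F := by
        apply List.flatMap_congr
        intro k' hk'
        have : key x ≠ k' := by have := hlt k' hk'; omega
        simp [this]
      rw [this]; simp
    · have hx' : key x ∈ ks := by
        rcases List.mem_cons.mp hx with h | h
        · exact absurd h hkx
        · exact h
      have h1 : ∀ y ∈ F k, (fun a b => decide (key a < key b)) x y = false := by
        intro y hy
        have hy' := hF k (by simp) y hy
        have : k < key x := hlt _ hx'
        simp [hy']; omega
      rw [List.flatMap_cons, pv_insertBy_append_not _ _ _ _ h1]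
      rw [ih hks' hx' (fun k' hk' => hF k' (by simp [hk']))]
      rw [List.flatMap_cons, if_neg hkx]
      simp

theorem pv_sorted_buckets {α : Type} (key : α → Int) (xs : List α) (ks : List Int)
    (hks : ks.Pairwise (· < ·)) (hall : ∀ x ∈ xs, key x ∈ ks) :
    PySem.List.sorted xs key false
      = ks.flatMap (fun k => xs.filter (fun x => decide (key x = k))) := by
  induction xs using List.reverseRecOn with
  | nil => simp [PySem.List.sorted_eq_foldl_insertBy]
  | append_singleton xs x ih =>
    have hx : key x ∈ ks := hall x (by simp)
    have hall' : ∀ y ∈ xs, key y ∈ ks := fun y hy => hall y (by simp [hy])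
    rw [PySem.List.sorted_eq_foldl_insertBy, List.foldl_append, List.foldl_cons, List.foldl_nil,
      ← PySem.List.sorted_eq_foldl_insertBy, ih hall']
    rw [pv_insert_buckets key x ks _ hks hx]
    · apply List.flatMap_congr
      intro k hk
      rw [List.filter_append]
      congr 1
      by_cases h : key x = k <;> simp [h]
    · intro k hk y hy
      have := List.of_mem_filter hy
      simpa using this

theorem pv_enum_pick {β : Type} (l : List String) (g : String → List β) (a k : Int) :
    ∀ s : Int, (PySem.List.enumerate l s).flatMap (fun q => if a + q.1 = k then g q.2 else [])
      = if 0 ≤ k - a - s ∧ k - a - s < (l.length : Int)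
          then g (PySem.List.pyGetD l (k - a - s) "") else [] := by
  induction l with
  | nil =>
    intro s
    simp only [PySem.List.enumerate, List.flatMap_nil, List.length_nil, Nat.cast_zero]
    rw [if_neg (by omega)]
  | cons x l ih =>
    intro s
    simp only [PySem.List.enumerate, List.flatMap_cons, ih (s + 1)]
    by_cases h : a + s = k
    · have h0 : ¬ (0 ≤ k - a - (s + 1) ∧ k - a - (s + 1) < (l.length : Int)) := by omega
      have hc : (0 : Int) ≤ k - a - s ∧ k - a - s < ((x :: l).length : Int) := by
        simp; omega
      rw [if_pos h, if_neg h0, if_pos hc]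
      have : k - a - s = 0 := by omega
      rw [this]
      have : PySem.List.pyGetD (x :: l) 0 "" = x := by
        rw [PySem.List.pyGetD_eq_getElem (x :: l) "" le_rfl (by simp)]
        simp
      rw [this]; simp
    · rw [if_neg h]
      by_cases hc : (0 : Int) ≤ k - a - (s + 1) ∧ k - a - (s + 1) < (l.length : Int)
      · have hc' : (0 : Int) ≤ k - a - s ∧ k - a - s < ((x :: l).length : Int) := by
          simp; omega
        rw [if_pos hc, if_pos hc', List.nil_append]
        congr 1
        rw [PySem.List.pyGetD_eq_getElem l "" hc.1 hc.2,
          PySem.List.pyGetD_eq_getElem (x :: l) "" hc'.1 hc'.2]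
        have hnat : (k - a - s).toNat = (k - a - (s + 1)).toNat + 1 := by omega
        simp only [hnat, List.getElem_cons_succ]
      · have hc' : ¬ ((0 : Int) ≤ k - a - s ∧ k - a - s < ((x :: l).length : Int)) := by
          simp; simp at hc; omega
        rw [if_neg hc, if_neg hc', List.nil_append]

theorem pv_flatMap_range_if {β : Type} (F : Int → List β) (lo hi N : Int)
    (h0 : 0 ≤ lo) (h1 : lo ≤ hi) (h2 : hi ≤ N) :
    (PySem.List.pyRange 0 N).flatMap (fun n => if lo ≤ n ∧ n < hi then F n else [])
      = (PySem.List.pyRange lo hi).flatMap F := by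
  rw [PySem.List.pyRange_one_append 0 lo N h0 (le_trans h1 h2),
    PySem.List.pyRange_one_append lo hi N h1 h2, List.flatMap_append, List.flatMap_append]
  have e1 : (PySem.List.pyRange 0 lo).flatMap (fun n => if lo ≤ n ∧ n < hi then F n else []) = [] := by
    have h : ∀ n ∈ PySem.List.pyRange 0 lo,
        (if lo ≤ n ∧ n < hi then F n else []) = ([] : List β) := by
      intro n hn
      have := PySem.List.mem_pyRange_one.mp hn
      rw [if_neg (by omega)]
    rw [List.flatMap_congr h]; simp
  have e3 : (PySem.List.pyRange hi N).flatMap (fun n => if lo ≤ n ∧ n < hi then F n else []) = [] := by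
    have h : ∀ n ∈ PySem.List.pyRange hi N,
        (if lo ≤ n ∧ n < hi then F n else []) = ([] : List β) := by
      intro n hn
      have := PySem.List.mem_pyRange_one.mp hn
      rw [if_neg (by omega)]
    rw [List.flatMap_congr h]; simp
  rw [e1, e3, List.nil_append, List.append_nil]
  apply List.flatMap_congr
  intro n hn
  have := PySem.List.mem_pyRange_one.mp hn
  rw [if_pos this]

theorem pv_foldl_congr {α β : Type} (l : List α) (f g : β → α → β) (init : β)
    (h : ∀ acc, ∀ x ∈ l, f acc x = g acc x) : l.foldl f init = l.foldl g init := by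
  induction l generalizing init with
  | nil => rfl
  | cons a l ih =>
    simp only [List.foldl_cons]
    rw [h init a (by simp)]
    exact ih _ (fun acc x hx => h acc x (by simp [hx]))

-- the unsorted pair list A builds, in flatMap form
theorem pv_A_un (l0 l1 : List String) :
    (PySem.List.enumerate l0).foldl (fun acc p =>
        (PySem.List.enumerate l1).foldl
          (fun acc2 q => acc2 ++ [(p.2, q.2, p.1 + q.1)] ++ [(q.2, p.2, p.1 + q.1)]) acc) []
      = (PySem.List.enumerate l0).flatMap (fun p =>
          (PySem.List.enumerate l1).flatMap (fun q =>
            [(p.2, q.2, p.1 + q.1), (q.2, p.2, p.1 + q.1)])) := by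
  have hinner : ∀ (p : Int × String) (acc : List (String × String × Int)),
      (PySem.List.enumerate l1).foldl
        (fun acc2 q => acc2 ++ [(p.2, q.2, p.1 + q.1)] ++ [(q.2, p.2, p.1 + q.1)]) acc
        = acc ++ (PySem.List.enumerate l1).flatMap (fun q =>
            [(p.2, q.2, p.1 + q.1), (q.2, p.2, p.1 + q.1)]) := by
    intro p acc
    rw [← PySem.List.foldl_append_eq_flatMap]
    congr 1
    funext acc2 q
    simp
  calc (PySem.List.enumerate l0).foldl (fun acc p =>
        (PySem.List.enumerate l1).foldl
          (fun acc2 q => acc2 ++ [(p.2, q.2, p.1 + q.1)] ++ [(q.2, p.2, p.1 + q.1)]) acc) []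
      = (PySem.List.enumerate l0).foldl (fun acc p =>
          acc ++ (PySem.List.enumerate l1).flatMap (fun q =>
            [(p.2, q.2, p.1 + q.1), (q.2, p.2, p.1 + q.1)])) [] := by
        apply pv_foldl_congr
        intro acc p _
        exact hinner p acc
    _ = _ := by rw [PySem.List.foldl_append_eq_flatMap]; simp

-- one bucket: the key-k slice of A's pair list equals B's k-th inner loop
theorem pv_bucket (l0 l1 : List String) (k : Int)
    (hk0 : 0 ≤ k) (hk1 : k < (l0.length : Int) + (l1.length : Int) - 1) :
    ((PySem.List.enumerate l0).flatMap (fun p =>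
        (PySem.List.enumerate l1).flatMap (fun q =>
          [(p.2, q.2, p.1 + q.1), (q.2, p.2, p.1 + q.1)]))).filter
        (fun x => decide (x.2.2 = k))
      = (PySem.List.pyRange (max 0 (k - (l1.length : Int) + 1))
            (min (l0.length : Int) (k + 1))).flatMap (fun n =>
          [(PySem.List.pyGetD l0 n "", PySem.List.pyGetD l1 (k - n) "", k),
           (PySem.List.pyGetD l1 (k - n) "", PySem.List.pyGetD l0 n "", k)]) := by
  rw [List.filter_flatMap]
  have step1 : ∀ p ∈ PySem.List.enumerate l0,
      ((PySem.List.enumerate l1).flatMap (fun q =>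
          [(p.2, q.2, p.1 + q.1), (q.2, p.2, p.1 + q.1)])).filter (fun x => decide (x.2.2 = k))
        = if 0 ≤ k - p.1 - 0 ∧ k - p.1 - 0 < (l1.length : Int)
            then [(p.2, PySem.List.pyGetD l1 (k - p.1 - 0) "", k),
                  (PySem.List.pyGetD l1 (k - p.1 - 0) "", p.2, k)] else [] := by
    intro p _
    rw [List.filter_flatMap]
    rw [← pv_enum_pick l1 (fun e2 => [(p.2, e2, k), (e2, p.2, k)]) p.1 k 0]
    apply List.flatMap_congr
    intro q _
    by_cases h : p.1 + q.1 = k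
    · simp [List.filter, h]
    · simp [List.filter, h]
  rw [List.flatMap_congr step1]
  rw [PySem.List.enumerate_eq_map_pyRange l0 "", List.flatMap_map]
  have step2 : ∀ n ∈ PySem.List.pyRange 0 (PySem.List.len l0),
      ((fun p : Int × String => if 0 ≤ k - p.1 - 0 ∧ k - p.1 - 0 < (l1.length : Int)
            then [(p.2, PySem.List.pyGetD l1 (k - p.1 - 0) "", k),
                  (PySem.List.pyGetD l1 (k - p.1 - 0) "", p.2, k)] else [])
        ((fun j => (j, PySem.List.pyGetD l0 j "")) n))
        = if max 0 (k - (l1.length : Int) + 1) ≤ n ∧ n < min (l0.length : Int) (k + 1)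
            then [(PySem.List.pyGetD l0 n "", PySem.List.pyGetD l1 (k - n) "", k),
                  (PySem.List.pyGetD l1 (k - n) "", PySem.List.pyGetD l0 n "", k)] else [] := by
    intro n hn
    have hn' := PySem.List.mem_pyRange_one.mp hn
    simp only [PySem.List.len_eq] at hn'
    simp only []
    have hiff : (0 ≤ k - n - 0 ∧ k - n - 0 < (l1.length : Int)) ↔
        (max 0 (k - (l1.length : Int) + 1) ≤ n ∧ n < min (l0.length : Int) (k + 1)) := by
      omega
    by_cases h : 0 ≤ k - n - 0 ∧ k - n - 0 < (l1.length : Int)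
    · rw [if_pos h, if_pos (hiff.mp h)]
      simp
    · rw [if_neg h, if_neg (fun hh => h (hiff.mpr hh))]
  refine Eq.trans (List.flatMap_congr step2) ?_
  have := pv_flatMap_range_if (N := (l0.length : Int))
    (lo := max 0 (k - (l1.length : Int) + 1)) (hi := min (l0.length : Int) (k + 1))
    (F := fun n => [(PySem.List.pyGetD l0 n "", PySem.List.pyGetD l1 (k - n) "", k),
                    (PySem.List.pyGetD l1 (k - n) "", PySem.List.pyGetD l0 n "", k)])
    (by omega) (by omega) (by omega)
  simpa [PySem.List.len_eq] using this

theorem pv_nested_foldl_flatMap {α β γ : Type} (L : List α) (I : α → List β) (g : α → β → List γ) :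
    L.foldl (fun acc k => (I k).foldl (fun acc2 n => acc2 ++ g k n) acc) []
      = L.flatMap (fun k => (I k).flatMap (g k)) := by
  refine Eq.trans (pv_foldl_congr L _ (fun acc k => acc ++ (I k).flatMap (g k)) [] ?_) ?_
  · intro acc k _
    exact PySem.List.foldl_append_eq_flatMap _ _ _
  · rw [PySem.List.foldl_append_eq_flatMap]
    simp

-- ===== VERDICT (by name: the statement is the Claim_ definition above) =====
theorem make_entity_combs_spec : Claim_equal_make_entity_combs := by
  intro entity_ids _ hpre
  obtain ⟨hne, hcase⟩ := hpre
  unfold Spec_make_entity_combs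
  match entity_ids, hne with
  | l0 :: rest, _ =>
    have hget0 : PySem.List.pyGet? (l0 :: rest) (0 : Int) = some l0 := by
      simp [PySem.List.pyGet?, PySem.List.pyIdx?]
    by_cases h0 : l0 = []
    · subst h0
      simp [make_entity_combs, make_entity_combs_alt,
        PySem.List.sorted_eq_foldl_insertBy]
    · have h2 : 2 ≤ (l0 :: rest).length := by
        rcases hcase with h | h
        · simp at h; exact absurd h h0
        · exact h
      match rest, h2 with
      | l1 :: rest', _ =>
        have hget1 : PySem.List.pyGet? (l0 :: l1 :: rest') (1 : Int) = some l1 := by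
          simp [PySem.List.pyGet?, PySem.List.pyIdx?]
        have hA : make_entity_combs (l0 :: l1 :: rest')
            = PySem.List.sorted ((PySem.List.enumerate l0).flatMap (fun p =>
                (PySem.List.enumerate l1).flatMap (fun q =>
                  [(p.2, q.2, p.1 + q.1), (q.2, p.2, p.1 + q.1)]))) (fun x => x.2.2) false := by
          simp only [make_entity_combs, hget0, hget1, Option.getD_some]
          rw [pv_A_un l0 l1]
        have hB : make_entity_combs_alt (l0 :: l1 :: rest')
            = (PySem.List.pyRange 0 ((l0.length : Int) + (l1.length : Int) - 1)).flatMap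
                (fun k => (PySem.List.pyRange (max 0 (k - (l1.length : Int) + 1))
                    (min (l0.length : Int) (k + 1))).flatMap (fun n =>
                  [(PySem.List.pyGetD l0 n "", PySem.List.pyGetD l1 (k - n) "", k),
                   (PySem.List.pyGetD l1 (k - n) "", PySem.List.pyGetD l0 n "", k)])) := by
          simp only [make_entity_combs_alt, hget0, hget1, if_neg h0]
          exact pv_nested_foldl_flatMap _ _ _
        have hall : ∀ x ∈ (PySem.List.enumerate l0).flatMap (fun p =>
            (PySem.List.enumerate l1).flatMap (fun q =>
              [(p.2, q.2, p.1 + q.1), (q.2, p.2, p.1 + q.1)])),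
            (fun x : String × String × Int => x.2.2) x
              ∈ PySem.List.pyRange 0 ((l0.length : Int) + (l1.length : Int) - 1) := by
          intro x hx
          rw [PySem.List.mem_pyRange_one]
          obtain ⟨p, hp, hx2⟩ := List.mem_flatMap.mp hx
          obtain ⟨q, hq, hx3⟩ := List.mem_flatMap.mp hx2
          obtain ⟨i, hi, rfl⟩ := (PySem.List.mem_enumerate_iff _ _ _).mp hp
          obtain ⟨j, hj, rfl⟩ := (PySem.List.mem_enumerate_iff _ _ _).mp hq
          rcases List.mem_cons.mp hx3 with rfl | hx4
          · simp; omega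
          · rcases List.mem_cons.mp hx4 with rfl | hx5
            · simp; omega
            · simp at hx5
        rw [hA, hB,
          pv_sorted_buckets (fun x : String × String × Int => x.2.2) _
            (PySem.List.pyRange 0 ((l0.length : Int) + (l1.length : Int) - 1))
            (PySem.List.pairwise_lt_pyRange_one _ _) hall]
        apply List.flatMap_congr
        intro k hk
        have hk' := PySem.List.mem_pyRange_one.mp hk
        exact pv_bucket l0 l1 k hk'.1 hk'.2
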